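-- pv_equiv track=rewrite | github.com/dhanalakshmbharathi/python-coding-challenge | count_spl_no.py | product_digits_quartic
-- ===== SOURCE A (Python) =====
-- def product_digits_quartic(n):
--     s=0
--     product = 1
--     while (n != 0):
--         product = product * (n % 10)
--         s=s+pow((n%10),4)
--         n = n // 10
--     return product,s
-- ===== SOURCE B (Python) =====
-- def product_digits_quartic(n):
--     if n == 0:
--         return (1, 0)
--     product, s = product_digits_quartic(n // 10)
--     d = n % 10
--     return (product * d, s + d ** 4)
-- ===== Notes on version B (the rewrite author's own statement) =====
-- stated objective: alternative
-- what changed: Replaced the iterative while-loop with two running accumulators by a direct recursion on n // 10 that combines each digit's contribution on the way back up.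
import Mathlib
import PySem

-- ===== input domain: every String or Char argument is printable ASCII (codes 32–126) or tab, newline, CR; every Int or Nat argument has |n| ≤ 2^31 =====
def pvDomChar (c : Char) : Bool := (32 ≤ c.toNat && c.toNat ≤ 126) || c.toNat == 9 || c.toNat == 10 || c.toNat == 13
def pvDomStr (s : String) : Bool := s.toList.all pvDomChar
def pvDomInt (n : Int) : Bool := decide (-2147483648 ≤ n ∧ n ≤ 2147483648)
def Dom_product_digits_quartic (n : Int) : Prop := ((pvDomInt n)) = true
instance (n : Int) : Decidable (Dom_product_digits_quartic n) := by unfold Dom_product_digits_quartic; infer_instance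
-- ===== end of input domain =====

-- B replaces A's fused while-loop (two running accumulators) with a direct recursion
-- on n // 10, combining each digit's contribution on the way back up (objective: alternative).


-- ===== PORT A =====
-- A's while loop; the fuel argument only makes the non-terminating negative case total
-- (those inputs are outside Pre_).
def pdqLoopA : Nat → Int → Int → Int → Int × Int
  | 0, _, product, s => (product, s)
  | fuel + 1, n, product, s =>
    if n ≠ 0 then
      pdqLoopA fuel (PySem.Int.floordiv n 10) (product * PySem.Int.mod n 10)
        (s + (PySem.Int.mod n 10) ^ 4)
    else (product, s)

def product_digits_quartic (n : Int) : Int × Int := pdqLoopA (n.toNat + 1) n 1 0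

-- ===== PORT B =====
-- B's recursion; fuel as above, only to totalise the negative case (outside Pre_).
def pdqRecB : Nat → Int → Int × Int
  | 0, _ => (1, 0)
  | fuel + 1, n =>
    if n = 0 then (1, 0)
    else
      let ps := pdqRecB fuel (PySem.Int.floordiv n 10)
      let d := PySem.Int.mod n 10
      (ps.1 * d, ps.2 + d ^ 4)

def product_digits_quartic_alt (n : Int) : Int × Int := pdqRecB (n.toNat + 1) n

-- ===== PRECONDITION & SPEC =====
-- A's while loop never terminates for negative n (n // 10 stays at -1), so Pre_ requires 0 ≤ n.
def Pre_product_digits_quartic (n : Int) : Prop := 0 ≤ n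
instance (n : Int) : Decidable (Pre_product_digits_quartic n) := by unfold Pre_product_digits_quartic; infer_instance
def pvWitness_product_digits_quartic : Int := 91825

def Spec_product_digits_quartic (n : Int) (out : Int × Int) : Prop := out = product_digits_quartic_alt n
instance (n : Int) (out : Int × Int) : Decidable (Spec_product_digits_quartic n out) := by unfold Spec_product_digits_quartic; infer_instance

-- ===== CLAIM (what is proved, stated in full; the proofs are below) =====
def Claim_equal_product_digits_quartic : Prop := ∀ (n : Int), Dom_product_digits_quartic n → Pre_product_digits_quartic n → Spec_product_digits_quartic n (product_digits_quartic n)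

-- ===== LEMMAS AND PROOFS =====

-- Key invariant: with enough fuel, A's accumulating loop equals B's recursion with the
-- accumulators folded in afterwards.
theorem pdqLoopA_eq_rec (fuel : Nat) :
    ∀ (n p s : Int), 0 ≤ n → n.toNat < fuel →
      pdqLoopA fuel n p s = (p * (pdqRecB fuel n).1, s + (pdqRecB fuel n).2) := by
  induction fuel with
  | zero => intro n p s _ h; omega
  | succ fuel ih =>
    intro n p s hn hlt
    by_cases h0 : n = 0
    · subst h0; simp [pdqLoopA, pdqRecB]
    · have hpos : 0 < n := lt_of_le_of_ne hn (Ne.symm h0)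
      have hq : PySem.Int.floordiv n 10 = n / 10 := PySem.Int.floordiv_eq_ediv_of_pos (by omega)
      have hq0 : 0 ≤ n / 10 := Int.ediv_nonneg hn (by omega)
      have hqlt : (n / 10).toNat < fuel := by
        have : n / 10 < n := by omega
        omega
      simp only [pdqLoopA, pdqRecB, if_neg h0, if_pos h0, ne_eq]
      rw [hq, ih (n / 10) _ _ hq0 hqlt]
      ring_nf

-- ===== VERDICT (by name: the statement is the Claim_ definition above) =====
theorem product_digits_quartic_spec : Claim_equal_product_digits_quartic := by
  intro n _ hpre
  unfold Spec_product_digits_quartic product_digits_quartic product_digits_quartic_alt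
  rw [pdqLoopA_eq_rec (n.toNat + 1) n 1 0 hpre (by omega)]
  simp
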